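-- pv_equiv track=rewrite | github.com/guardiaum/DeepEx | modules/Extractor.py | getTokensInWindow
-- ===== SOURCE A (Python) =====
-- def getTokensInWindow(sent, current_index, window_size, type):
--
--     returnedTokens = []
--     for i in range(1, window_size):
--         if len(returnedTokens) < window_size:
--             index = 0
--             if type == 'prev':
--                 index = current_index - i
--             elif type == 'next':
--                 index = current_index + i
--
--             if 0 <= index < len(sent):
--                 returnedTokens.append(sent[index][0])
--     return returnedTokens
-- ===== SOURCE B (Python) =====
-- def getTokensInWindow(sent, current_index, window_size, type):
--     if type == 'prev':
--         lo = max(0, current_index - window_size + 1)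
--         hi = max(0, min(len(sent), current_index))
--         return [t[0] for t in reversed(sent[lo:hi])]
--     if type == 'next':
--         lo = max(0, current_index + 1)
--         hi = max(0, min(len(sent), current_index + window_size))
--         return [t[0] for t in sent[lo:hi]]
--     return []
-- ===== Notes on version B (the rewrite author's own statement) =====
-- stated objective: simpler
-- what changed: Computes the clamped index range once and takes one slice of sent (reversed for 'prev') instead of A's per-step loop with a bounds check; Pre_ excludes calls with a malformed direction argument (type neither 'prev' nor 'next') on which A still produces tokens, because there A's leftover index 0 repeats the first token window_size-1 times, an artefact B (returning []) does not mirror.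
-- outside the precondition, e.g. on getTokensInWindow([('a', 'x')], 0, 2, 'other'): A returns ['a'], B returns []
import Mathlib
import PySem

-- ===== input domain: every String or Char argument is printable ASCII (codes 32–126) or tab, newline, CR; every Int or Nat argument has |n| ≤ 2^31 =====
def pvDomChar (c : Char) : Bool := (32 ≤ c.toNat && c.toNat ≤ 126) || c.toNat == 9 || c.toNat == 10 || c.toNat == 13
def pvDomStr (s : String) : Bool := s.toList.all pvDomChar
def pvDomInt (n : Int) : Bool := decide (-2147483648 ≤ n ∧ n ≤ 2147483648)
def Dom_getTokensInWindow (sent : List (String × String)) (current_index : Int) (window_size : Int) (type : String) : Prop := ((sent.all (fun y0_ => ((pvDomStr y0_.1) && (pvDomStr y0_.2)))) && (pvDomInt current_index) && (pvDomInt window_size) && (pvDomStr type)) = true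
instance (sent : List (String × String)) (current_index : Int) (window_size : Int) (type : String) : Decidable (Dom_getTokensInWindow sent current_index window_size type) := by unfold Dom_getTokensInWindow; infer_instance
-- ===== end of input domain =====

-- B computes the clamped window by one slice (reversed for 'prev') instead of A's per-step loop with bounds checks; Pre_ excludes malformed-direction calls (type neither 'prev' nor 'next') on which A's leftover index 0 yields repeated first tokens.


-- ===== PORT A =====
def getTokensInWindow (sent : List (String × String)) (current_index : Int) (window_size : Int) (type : String) : List String :=
  (PySem.List.pyRange 1 window_size 1).foldl
    (fun returnedTokens i =>
      if (returnedTokens.length : Int) < window_size then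
        let index : Int :=
          if type == "prev" then current_index - i
          else if type == "next" then current_index + i
          else 0
        if 0 ≤ index ∧ index < (sent.length : Int) then
          -- sent[index]: the guard ensures the index is in range, so pyGetD is exact here
          returnedTokens ++ [(PySem.List.pyGetD sent index ("", "")).1]
        else returnedTokens
      else returnedTokens)
    []

-- ===== PORT B =====
def getTokensInWindow_alt (sent : List (String × String)) (current_index : Int) (window_size : Int) (type : String) : List String :=
  if type == "prev" then
    let lo := max 0 (current_index - window_size + 1)
    let hi := max 0 (min (sent.length : Int) current_index)
    ((PySem.List.slice sent (some lo) (some hi)).reverse).map (fun t => t.1)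
  else if type == "next" then
    let lo := max 0 (current_index + 1)
    let hi := max 0 (min (sent.length : Int) (current_index + window_size))
    (PySem.List.slice sent (some lo) (some hi)).map (fun t => t.1)
  else
    []

-- ===== PRECONDITION & SPEC =====
-- Pre_ excludes calls whose type is neither 'prev' nor 'next' (a malformed direction argument,
-- outside the function's natural domain) on which A still produces tokens: there A's leftover
-- index 0 repeats the first token window_size-1 times, an artefact B (returning []) does not mirror.
def Pre_getTokensInWindow (sent : List (String × String)) (current_index : Int) (window_size : Int) (type : String) : Prop :=
  type = "prev" ∨ type = "next" ∨ sent = [] ∨ window_size < 2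
instance (sent : List (String × String)) (current_index : Int) (window_size : Int) (type : String) : Decidable (Pre_getTokensInWindow sent current_index window_size type) := by unfold Pre_getTokensInWindow; infer_instance

def pvWitness_getTokensInWindow : (List (String × String)) × Int × Int × String := ([("a", "x"), ("b", "y")], 1, 2, "prev")

def Spec_getTokensInWindow (sent : List (String × String)) (current_index : Int) (window_size : Int) (type : String) (out : List String) : Prop := out = getTokensInWindow_alt sent current_index window_size type
instance (sent : List (String × String)) (current_index : Int) (window_size : Int) (type : String) (out : List String) : Decidable (Spec_getTokensInWindow sent current_index window_size type out) := by unfold Spec_getTokensInWindow; infer_instance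

-- ===== CLAIM (what is proved, stated in full; the proofs are below) =====
def Claim_equal_getTokensInWindow : Prop := ∀ (sent : List (String × String)) (current_index : Int) (window_size : Int) (type : String), Dom_getTokensInWindow sent current_index window_size type → Pre_getTokensInWindow sent current_index window_size type → Spec_getTokensInWindow sent current_index window_size type (getTokensInWindow sent current_index window_size type)

-- ===== LEMMAS AND PROOFS =====

-- A's guard `len(returnedTokens) < window_size` never fails: each step grows the
-- accumulator by at most one and the loop runs at most window_size - 1 times.
lemma pv_guard_drop {β : Type} (ws : Int) (g : List β → Int → List β)
    (hg : ∀ acc i, (g acc i).length ≤ acc.length + 1) :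
    ∀ (l : List Int) (acc : List β), (l ≠ [] → (acc.length : Int) + l.length ≤ ws) →
      l.foldl (fun acc i => if (acc.length : Int) < ws then g acc i else acc) acc = l.foldl g acc := by
  intro l
  induction l with
  | nil => intro acc _; rfl
  | cons x t ih =>
    intro acc h
    have hb := h (by simp)
    have hlt : (acc.length : Int) < ws := by
      simp only [List.length_cons] at hb; push_cast at hb; omega
    simp only [List.foldl_cons, if_pos hlt]
    apply ih
    intro _
    have hx := hg acc x
    simp only [List.length_cons] at hb
    push_cast at hb ⊢
    omega

-- the in-bounds members of an ascending index range pick out exactly a clamped drop/take of the list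
lemma pv_filt {α : Type} (d : α) (sent : List α) :
    ∀ (k : Nat) (a b : Int), (b - a).toNat = k →
      ((PySem.List.pyRange a b 1).filter
          (fun j => decide (0 ≤ j ∧ j < (sent.length : Int)))).map
        (fun j => PySem.List.pyGetD sent j d)
      = (sent.drop (max 0 a).toNat).take
          ((max 0 (min (sent.length : Int) b)).toNat - (max 0 a).toNat) := by
  intro k
  induction k with
  | zero =>
    intro a b hk
    rw [PySem.List.pyRange_one_eq_nil (by omega)]
    have hle : (max 0 (min (sent.length : Int) b)).toNat ≤ (max 0 a).toNat := by omega
    simp [Nat.sub_eq_zero_of_le hle]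
  | succ k ih =>
    intro a b hk
    have hab : a < b := by omega
    rw [PySem.List.pyRange_one_cons hab]
    by_cases hin : 0 ≤ a ∧ a < (sent.length : Int)
    · have haN : a.toNat < sent.length := by omega
      rw [List.filter_cons_of_pos (by simpa using hin), List.map_cons,
          ih (a + 1) b (by omega)]
      have hmax1 : (max 0 (a + 1)).toNat = a.toNat + 1 := by omega
      have hmax0 : (max 0 a).toNat = a.toNat := by omega
      have hdrop : sent.drop a.toNat = sent[a.toNat] :: sent.drop (a.toNat + 1) :=
        List.drop_eq_getElem_cons haN
      have hhi : a.toNat < (max 0 (min (sent.length : Int) b)).toNat := by omega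
      rw [hmax1, hmax0, hdrop,
          show (max 0 (min (sent.length : Int) b)).toNat - a.toNat
            = ((max 0 (min (sent.length : Int) b)).toNat - (a.toNat + 1)) + 1 from by omega,
          List.take_succ_cons]
      congr 1
      exact PySem.List.pyGetD_eq_getElem sent d hin.1 hin.2
    · rw [List.filter_cons_of_neg (by simpa using hin), ih (a + 1) b (by omega)]
      by_cases hneg : a < 0
      · rw [show (max 0 (a + 1)).toNat = (max 0 a).toNat from by omega]
      · have h1 : sent.length ≤ (max 0 a).toNat := by omega
        have h2 : sent.length ≤ (max 0 (a + 1)).toNat := by omega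
        rw [List.drop_eq_nil_of_le h1, List.drop_eq_nil_of_le h2]
        simp

lemma pv_asc {α β : Type} (f : α → β) (d : α) (sent : List α) (a b : Int) :
    ((PySem.List.pyRange a b 1).filter
        (fun j => decide (0 ≤ j ∧ j < (sent.length : Int)))).map
      (fun j => f (PySem.List.pyGetD sent j d))
    = ((sent.drop (max 0 a).toNat).take
        ((max 0 (min (sent.length : Int) b)).toNat - (max 0 a).toNat)).map f := by
  rw [← pv_filt d sent ((b - a).toNat) a b rfl, List.map_map]
  rfl

-- the loop counters 1..ws-1 are the window indices ci-1 down to ci-ws+1, read off a reversed ascending range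
lemma pv_range_prev (ci ws : Int) :
    PySem.List.pyRange 1 ws 1
      = ((PySem.List.pyRange (ci - ws + 1) ci 1).reverse).map (fun j => ci - j) := by
  apply List.ext_getElem
  · simp [PySem.List.length_pyRange_one]
    omega
  · intro k h1 h2
    simp only [List.getElem_map, List.getElem_reverse, PySem.List.getElem_pyRange_one]
    simp only [PySem.List.length_pyRange_one] at h1 h2 ⊢
    omega

lemma pv_range_next (ci ws : Int) :
    PySem.List.pyRange 1 ws 1
      = (PySem.List.pyRange (ci + 1) (ci + ws) 1).map (fun j => j - ci) := by
  apply List.ext_getElem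
  · simp only [List.length_map, PySem.List.length_pyRange_one]
    omega
  · intro k h1 h2
    simp only [List.getElem_map, PySem.List.getElem_pyRange_one]
    simp only [PySem.List.length_pyRange_one] at h1 h2 ⊢
    omega

lemma pv_prev {α β : Type} (f : α → β) (d : α) (sent : List α) (ci ws : Int) :
    ((PySem.List.pyRange 1 ws 1).filter
        (fun i => decide (0 ≤ ci - i ∧ ci - i < (sent.length : Int)))).map
      (fun i => f (PySem.List.pyGetD sent (ci - i) d))
    = (((sent.drop (max 0 (ci - ws + 1)).toNat).take
          ((max 0 (min (sent.length : Int) ci)).toNat - (max 0 (ci - ws + 1)).toNat)).map f).reverse := by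
  rw [pv_range_prev ci ws, List.filter_map, List.filter_reverse, List.map_map, List.map_reverse]
  simp only [Function.comp_def]
  simp only [show ∀ j : Int, ci - (ci - j) = j from fun j => by omega]
  rw [pv_asc f d sent (ci - ws + 1) ci]

lemma pv_next {α β : Type} (f : α → β) (d : α) (sent : List α) (ci ws : Int) :
    ((PySem.List.pyRange 1 ws 1).filter
        (fun i => decide (0 ≤ ci + i ∧ ci + i < (sent.length : Int)))).map
      (fun i => f (PySem.List.pyGetD sent (ci + i) d))
    = ((sent.drop (max 0 (ci + 1)).toNat).take
        ((max 0 (min (sent.length : Int) (ci + ws))).toNat - (max 0 (ci + 1)).toNat)).map f := by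
  rw [pv_range_next ci ws, List.filter_map, List.map_map]
  simp only [Function.comp_def]
  simp only [show ∀ j : Int, ci + (j - ci) = j from fun j => by omega]
  exact pv_asc f d sent (ci + 1) (ci + ws)

-- A's fold with its never-failing guard dropped and the append-if step rewritten as map-of-filter
lemma pv_A_eq (sent : List (String × String)) (ci ws : Int) (ty : String) :
    getTokensInWindow sent ci ws ty
      = ((PySem.List.pyRange 1 ws 1).filter
            (fun i =>
              decide (0 ≤ (if ty == "prev" then ci - i else if ty == "next" then ci + i else 0) ∧
                (if ty == "prev" then ci - i else if ty == "next" then ci + i else 0) < (sent.length : Int)))).map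
          (fun i => (PySem.List.pyGetD sent (if ty == "prev" then ci - i else if ty == "next" then ci + i else 0) ("", "")).1) := by
  have hA : getTokensInWindow sent ci ws ty
      = (PySem.List.pyRange 1 ws 1).foldl
          (fun acc i =>
            let index : Int := if ty == "prev" then ci - i else if ty == "next" then ci + i else 0
            if 0 ≤ index ∧ index < (sent.length : Int) then
              acc ++ [(PySem.List.pyGetD sent index ("", "")).1]
            else acc) [] := by
    unfold getTokensInWindow
    refine pv_guard_drop ws _ (fun acc i => by dsimp only; split_ifs <;> simp) _ [] (fun hne => ?_)
    have hws : 1 < ws := by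
      by_contra hcon
      exact hne (PySem.List.pyRange_one_eq_nil (by omega))
    simp only [PySem.List.length_pyRange_one, List.length_nil, Nat.cast_zero]
    omega
  rw [hA,
      PySem.List.foldl_append_ite
        (fun i : Int => 0 ≤ (if ty == "prev" then ci - i else if ty == "next" then ci + i else 0) ∧
          (if ty == "prev" then ci - i else if ty == "next" then ci + i else 0) < (sent.length : Int))
        (fun i : Int => (PySem.List.pyGetD sent (if ty == "prev" then ci - i else if ty == "next" then ci + i else 0) ("", "")).1),
      List.nil_append]

-- ===== VERDICT (by name: the statement is the Claim_ definition above) =====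
theorem getTokensInWindow_spec : Claim_equal_getTokensInWindow := by
  intro sent ci ws ty _ hpre
  unfold Spec_getTokensInWindow getTokensInWindow_alt
  rw [pv_A_eq]
  by_cases hp : ty = "prev"
  · subst hp
    simp only [beq_self_eq_true, if_true]
    rw [pv_prev (fun t => t.1) ("", "") sent ci ws,
        PySem.List.slice_toNat sent (le_max_left _ _) (le_max_left _ _), List.map_reverse]
  · by_cases hn : ty = "next"
    · subst hn
      have hbp : (("next" : String) == "prev") = false := by decide
      simp only [hbp, Bool.false_eq_true, if_false, beq_self_eq_true, if_true]
      rw [pv_next (fun t => t.1) ("", "") sent ci ws,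
          PySem.List.slice_toNat sent (le_max_left _ _) (le_max_left _ _)]
    · have hbp : (ty == "prev") = false := by simpa using hp
      have hbn : (ty == "next") = false := by simpa using hn
      simp only [hbp, hbn, Bool.false_eq_true, if_false]
      have hsmall : sent = [] ∨ ws < 2 := by
        rcases hpre with h | h | h | h
        · exact absurd h hp
        · exact absurd h hn
        · exact Or.inl h
        · exact Or.inr h
      rcases hsmall with hs | hws
      · subst hs; simp
      · rw [PySem.List.pyRange_one_eq_nil (by omega)]; rfl
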